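-- pv_equiv track=rewrite | github.com/diegosramirez/bmad-orchestrator | src/bmad_orchestrator/utils/jira_mermaid.py | markdown_intermediate_without_mermaid_images
-- ===== SOURCE A (Python) =====
-- from typing import Any, Literal
--
-- _MermaidSeg = tuple[Literal["text", "mermaid"], str]
--
-- def split_markdown_mermaid_segments(markdown: str) -> list[_MermaidSeg]:
--     """Split markdown into alternating text and mermaid fence bodies (no fences)."""
--     text = (markdown or "").replace("\r\n", "\n")
--     lines = text.split("\n")
--     segments: list[_MermaidSeg] = []
--     i = 0
--     n = len(lines)
--     buf: list[str] = []
--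
--     def flush_text() -> None:
--         if buf:
--             segments.append(("text", "\n".join(buf)))
--             buf.clear()
--
--     while i < n:
--         stripped = lines[i].strip()
--         if stripped.startswith("```"):
--             lang = stripped[3:].strip()
--             if lang.lower() == "mermaid":
--                 flush_text()
--                 i += 1
--                 code_lines: list[str] = []
--                 while i < n and lines[i].strip() != "```":
--                     code_lines.append(lines[i])
--                     i += 1
--                 if i < n and lines[i].strip() == "```":
--                     i += 1
--                 segments.append(("mermaid", "\n".join(code_lines)))
--                 continue
--         buf.append(lines[i])
--         i += 1
--     flush_text()
--     if not segments:
--         segments.append(("text", text))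
--     return segments
--
-- def markdown_intermediate_without_mermaid_images(markdown: str) -> str:
--     """Placeholder text for phase-1 create_issue when phase-2 will attach diagrams."""
--     segments = split_markdown_mermaid_segments(markdown)
--     parts: list[str] = []
--     for kind, seg in segments:
--         if kind == "text":
--             parts.append(seg)
--         else:
--             parts.append(
--                 "\n\n*[Mermaid diagram will be attached after issue creation.]*\n\n",
--             )
--     return "".join(parts)
-- ===== SOURCE B (Python) =====
-- _PLACEHOLDER = "\n\n*[Mermaid diagram will be attached after issue creation.]*\n\n"
--
--
-- def _is_mermaid_open(line):
--     s = line.strip()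
--     return s.startswith("```") and s[3:].strip().lower() == "mermaid"
--
--
-- def markdown_intermediate_without_mermaid_images(markdown):
--     """Placeholder text for phase-1 create_issue when phase-2 will attach diagrams."""
--     lines = (markdown or "").replace("\r\n", "\n").split("\n")
--     out = []
--     while True:
--         j = 0
--         while j < len(lines) and not _is_mermaid_open(lines[j]):
--             j += 1
--         if j == len(lines):
--             out.append("\n".join(lines))
--             return "".join(out)
--         out.append("\n".join(lines[:j]))
--         out.append(_PLACEHOLDER)
--         k = j + 1
--         while k < len(lines) and lines[k].strip() != "```":
--             k += 1
--         lines = lines[k + 1:]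
-- ===== Notes on version B (the rewrite author's own statement) =====
-- stated objective: simpler
-- what changed: Replaces A's buffered text-segment builder (flush_text, alternating segment list, second rendering pass) with a single consume loop that repeatedly cuts the line list at the next mermaid fence and emits the text chunk and placeholder directly.
import Mathlib
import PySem

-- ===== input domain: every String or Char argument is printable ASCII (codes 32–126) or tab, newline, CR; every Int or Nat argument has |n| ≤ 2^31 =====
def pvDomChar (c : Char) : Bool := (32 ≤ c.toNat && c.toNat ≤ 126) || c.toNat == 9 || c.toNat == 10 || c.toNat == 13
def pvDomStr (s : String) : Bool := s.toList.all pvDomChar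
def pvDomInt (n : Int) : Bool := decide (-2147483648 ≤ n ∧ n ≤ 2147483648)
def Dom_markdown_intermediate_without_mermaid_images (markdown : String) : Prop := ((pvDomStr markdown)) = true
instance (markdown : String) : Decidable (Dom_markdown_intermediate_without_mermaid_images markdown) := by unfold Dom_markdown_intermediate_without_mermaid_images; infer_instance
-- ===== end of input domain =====

-- B replaces A's segment/buffer machinery by one consume loop that repeatedly cuts the
-- line list at the next mermaid fence (objective: simpler).

def pvPlaceholder : String := "\n\n*[Mermaid diagram will be attached after issue creation.]*\n\n"

-- ===== PORT A =====

theorem pvTailLe {α : Type} (l : List α) : l.tail.length ≤ l.length := by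
  cases l <;> simp

-- inner `while i < n and lines[i].strip() != "```"` scan: (code_lines, rest starting at the closing line if any)
def pvScanClose : List String → List String × List String
  | [] => ([], [])
  | l :: rest =>
    if PySem.Str.strip l == "```" then ([], l :: rest)
    else
      let (c, r) := pvScanClose rest
      (l :: c, r)

theorem pvScanClose_snd_length (xs : List String) : (pvScanClose xs).2.length ≤ xs.length := by
  induction xs with
  | nil => simp [pvScanClose]
  | cons l rest ih =>
    simp only [pvScanClose]
    split
    · simp
    · simpa using Nat.le_succ_of_le ih

-- `flush_text`
def pvFlush (buf : List String) (segs : List (String × String)) : List (String × String) :=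
  if buf = [] then segs else segs ++ [("text", PySem.Str.join "\n" buf)]

-- A's outer `while i < n` loop over the remaining lines, carrying buf and segments
def pvALoop (lines buf : List String) (segs : List (String × String)) : List (String × String) :=
  match lines with
  | [] => pvFlush buf segs
  | l :: rest =>
    let stripped := PySem.Str.strip l
    if PySem.Str.startswith stripped "```" &&
        (PySem.Str.lower (PySem.Str.strip (PySem.Str.slice stripped (some 3) none)) == "mermaid") then
      let segs' := pvFlush buf segs
      let code := (pvScanClose rest).1
      let rest' := (pvScanClose rest).2.tail    -- `if i < n and … == "```": i += 1`
      pvALoop rest' [] (segs' ++ [("mermaid", PySem.Str.join "\n" code)])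
    else
      pvALoop rest (buf ++ [l]) segs
termination_by lines.length
decreasing_by
  · exact Nat.lt_succ_of_le (Nat.le_trans (pvTailLe _) (pvScanClose_snd_length rest))
  · simp

def pvSplitSegments (markdown : String) : List (String × String) :=
  let text := PySem.Str.replace (if markdown == "" then "" else markdown) "\r\n" "\n"
  let lines := (PySem.Str.split? text "\n").getD []
  let segs := pvALoop lines [] []
  if segs = [] then [("text", text)] else segs

def markdown_intermediate_without_mermaid_images (markdown : String) : String :=
  let segments := pvSplitSegments markdown
  let parts := segments.foldl
    (fun acc kv => acc ++ [if kv.1 == "text" then kv.2 else pvPlaceholder]) ([] : List String)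
  PySem.Str.join "" parts

-- ===== PORT B =====

def pvIsOpen (line : String) : Bool :=
  let s := PySem.Str.strip line
  PySem.Str.startswith s "```" &&
    (PySem.Str.lower (PySem.Str.strip (PySem.Str.slice s (some 3) none)) == "mermaid")

-- B's inner `while j < len(lines) and not _is_mermaid_open(lines[j])` scan
def pvSpanOpen : List String → List String × List String
  | [] => ([], [])
  | l :: rest =>
    if pvIsOpen l then ([], l :: rest)
    else
      let (p, r) := pvSpanOpen rest
      (l :: p, r)

theorem pvSpanOpen_snd_length (xs : List String) : (pvSpanOpen xs).2.length ≤ xs.length := by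
  induction xs with
  | nil => simp [pvSpanOpen]
  | cons l rest ih =>
    simp only [pvSpanOpen]
    split
    · simp
    · simpa using Nat.le_succ_of_le ih

-- B's `while k < len(lines) and lines[k].strip() != "```"` scan plus the `lines[k+1:]` cut
def pvDropBlock : List String → List String
  | [] => []
  | l :: rest => if PySem.Str.strip l == "```" then rest else pvDropBlock rest

theorem pvDropBlock_length (xs : List String) : (pvDropBlock xs).length ≤ xs.length := by
  induction xs with
  | nil => simp [pvDropBlock]
  | cons l rest ih =>
    simp only [pvDropBlock]
    split
    · simp
    · exact Nat.le_succ_of_le ih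

-- B's outer `while True` loop: out accumulates parts, lines is what remains
def pvBLoop (lines out : List String) : String :=
  match h : pvSpanOpen lines with
  | (_, []) => PySem.Str.join "" (out ++ [PySem.Str.join "\n" lines])
  | (pre, _ :: tail) =>
    pvBLoop (pvDropBlock tail) (out ++ [PySem.Str.join "\n" pre, pvPlaceholder])
termination_by lines.length
decreasing_by
  have h2 := pvSpanOpen_snd_length lines
  rw [h] at h2
  simp at h2
  exact Nat.lt_of_le_of_lt (pvDropBlock_length tail) (Nat.lt_of_lt_of_le (Nat.lt_succ_self _) h2)

def markdown_intermediate_without_mermaid_images_alt (markdown : String) : String :=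
  let text := PySem.Str.replace (if markdown == "" then "" else markdown) "\r\n" "\n"
  pvBLoop ((PySem.Str.split? text "\n").getD []) []

-- ===== PRECONDITION & SPEC =====
def Spec_markdown_intermediate_without_mermaid_images (markdown : String) (out : String) : Prop := out = markdown_intermediate_without_mermaid_images_alt markdown
instance (markdown : String) (out : String) : Decidable (Spec_markdown_intermediate_without_mermaid_images markdown out) := by unfold Spec_markdown_intermediate_without_mermaid_images; infer_instance

-- ===== CLAIM (what is proved, stated in full; the proofs are below) =====
def Claim_equal_markdown_intermediate_without_mermaid_images : Prop := ∀ (markdown : String), Dom_markdown_intermediate_without_mermaid_images markdown → Spec_markdown_intermediate_without_mermaid_images markdown (markdown_intermediate_without_mermaid_images markdown)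

-- ===== LEMMAS AND PROOFS =====

-- join with "" is concatenation
theorem pvJoinFlatten (ls : List (List Char)) : PySem.Chars.join [] ls = ls.flatten := by
  match ls with
  | [] => simp [PySem.Chars.join_nil]
  | [a] => simp [PySem.Chars.join_singleton]
  | a :: b :: r => rw [PySem.Chars.join_cons_cons, pvJoinFlatten (b :: r)]; simp

theorem pvToListJoin0 (xs : List String) :
    (PySem.Str.join "" xs).toList = (xs.map String.toList).flatten := by
  have h : ("" : String).toList = [] := rfl
  rw [PySem.Str.toList_join, h, pvJoinFlatten]

theorem pvJoinNL_nil : PySem.Str.join "\n" [] = "" := by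
  apply String.toList_inj.mp
  rw [PySem.Str.toList_join]
  simp [PySem.Chars.join_nil]

-- render a segment list the way A's final loop + "".join does
def pvRender (segs : List (String × String)) : String :=
  PySem.Str.join ""
    (segs.map (fun kv => if kv.1 == "text" then kv.2 else pvPlaceholder))

theorem pvRender_nil : pvRender [] = "" := by
  apply String.toList_inj.mp
  simp [pvRender, pvToListJoin0]

theorem pvRender_append_text (segs : List (String × String)) (s : String) :
    pvRender (segs ++ [("text", s)]) = pvRender segs ++ s := by
  apply String.toList_inj.mp
  simp [pvRender, pvToListJoin0, pvJoinFlatten, List.map_append, String.toList_append]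

theorem pvRender_append_merm (segs : List (String × String)) (s : String) :
    pvRender (segs ++ [("mermaid", s)]) = pvRender segs ++ pvPlaceholder := by
  apply String.toList_inj.mp
  have hne : (("mermaid" : String) == "text") = false := by decide
  simp [pvRender, pvToListJoin0, pvJoinFlatten, List.map_append, String.toList_append, hne]

-- pvBLoop unfold lemmas (the two branches of B's loop body)
theorem pvBLoop_eq_base (lines out pre : List String)
    (h : pvSpanOpen lines = (pre, [])) :
    pvBLoop lines out = PySem.Str.join "" (out ++ [PySem.Str.join "\n" lines]) := by
  rw [pvBLoop]
  split
  · rfl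
  · rename_i pre' l tail heq
    rw [h] at heq
    simp at heq

theorem pvBLoop_eq_step (lines out pre : List String) (l : String) (tail : List String)
    (h : pvSpanOpen lines = (pre, l :: tail)) :
    pvBLoop lines out =
      pvBLoop (pvDropBlock tail) (out ++ [PySem.Str.join "\n" pre, pvPlaceholder]) := by
  rw [pvBLoop]
  split
  · rename_i pre' heq
    rw [h] at heq
    simp at heq
  · rename_i pre' l' tail' heq
    rw [h] at heq
    obtain ⟨h1, h2, h3⟩ := by simpa using heq
    subst h1; subst h3
    rfl

-- the accumulator of B's loop factors out
theorem pvBLoop_out (n : Nat) :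
    ∀ lines : List String, lines.length ≤ n → ∀ out,
      pvBLoop lines out = PySem.Str.join "" out ++ pvBLoop lines [] := by
  induction n with
  | zero =>
    intro lines hlen out
    have hnil : lines = [] := List.length_eq_zero_iff.mp (Nat.le_zero.mp hlen)
    subst hnil
    have hsp : pvSpanOpen [] = (([] : List String), ([] : List String)) := rfl
    rw [pvBLoop_eq_base _ _ _ hsp, pvBLoop_eq_base _ _ _ hsp]
    apply String.toList_inj.mp
    simp [pvToListJoin0, pvJoinFlatten, PySem.Chars.join_nil, String.toList_append]
  | succ n ih =>
    intro lines hlen out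
    rcases hsp : pvSpanOpen lines with ⟨pre, rest⟩
    cases rest with
    | nil =>
      rw [pvBLoop_eq_base _ _ _ hsp, pvBLoop_eq_base _ _ _ hsp]
      apply String.toList_inj.mp
      simp [pvToListJoin0, pvJoinFlatten, PySem.Chars.join_nil, String.toList_append]
    | cons l tail =>
      have htl : tail.length < lines.length := by
        have h2 := pvSpanOpen_snd_length lines
        rw [hsp] at h2
        simp at h2
        omega
      have hd : (pvDropBlock tail).length ≤ n := by
        have := pvDropBlock_length tail
        omega
      rw [pvBLoop_eq_step _ _ _ _ _ hsp, pvBLoop_eq_step _ _ _ _ _ hsp,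
        ih _ hd (out ++ [PySem.Str.join "\n" pre, pvPlaceholder]),
        ih _ hd ([] ++ [PySem.Str.join "\n" pre, pvPlaceholder])]
      apply String.toList_inj.mp
      simp [pvToListJoin0, pvJoinFlatten, PySem.Chars.join_nil, String.toList_append]

-- pvALoop unfold lemmas
theorem pvALoop_nil (buf : List String) (segs : List (String × String)) :
    pvALoop [] buf segs = pvFlush buf segs := by
  rw [pvALoop]

theorem pvALoop_cons_open (l : String) (rest buf : List String)
    (segs : List (String × String)) (h : pvIsOpen l = true) :
    pvALoop (l :: rest) buf segs =
      pvALoop ((pvScanClose rest).2.tail) []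
        (pvFlush buf segs ++ [("mermaid", PySem.Str.join "\n" (pvScanClose rest).1)]) := by
  rw [pvALoop]
  simp only [pvIsOpen] at h
  rw [if_pos h]

theorem pvALoop_cons_notopen (l : String) (rest buf : List String)
    (segs : List (String × String)) (h : pvIsOpen l = false) :
    pvALoop (l :: rest) buf segs = pvALoop rest (buf ++ [l]) segs := by
  rw [pvALoop]
  simp only [pvIsOpen] at h
  rw [if_neg (by rw [h]; simp)]

-- B's close scan computes the same cut as A's
theorem pvDropBlock_eq_scan (xs : List String) :
    pvDropBlock xs = (pvScanClose xs).2.tail := by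
  induction xs with
  | nil => rfl
  | cons l rest ih =>
    simp only [pvDropBlock, pvScanClose]
    split
    · rfl
    · simpa using ih

-- span over an all-non-open prefix stops at the first open line
theorem pvSpanOpen_all (buf : List String) (hbuf : ∀ l ∈ buf, pvIsOpen l = false) :
    pvSpanOpen buf = (buf, []) := by
  induction buf with
  | nil => rfl
  | cons b bs ih =>
    have hb : pvIsOpen b = false := hbuf b (by simp)
    simp only [pvSpanOpen, hb]
    rw [ih (fun l hl => hbuf l (by simp [hl]))]
    simp

theorem pvSpanOpen_append (buf : List String) (l : String) (rest : List String)
    (hbuf : ∀ x ∈ buf, pvIsOpen x = false) (hl : pvIsOpen l = true) :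
    pvSpanOpen (buf ++ l :: rest) = (buf, l :: rest) := by
  induction buf with
  | nil => simp [pvSpanOpen, hl]
  | cons b bs ih =>
    have hb : pvIsOpen b = false := hbuf b (by simp)
    simp only [List.cons_append, pvSpanOpen, hb]
    rw [ih (fun x hx => hbuf x (by simp [hx]))]
    simp

-- MAIN INVARIANT: A's buffered segment loop renders to what B's consume loop emits
theorem pvMain (n : Nat) :
    ∀ lines : List String, lines.length ≤ n →
    ∀ (buf : List String) (segs : List (String × String)),
      (∀ l ∈ buf, pvIsOpen l = false) →
      pvRender (pvALoop lines buf segs) = pvRender segs ++ pvBLoop (buf ++ lines) [] := by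
  induction n with
  | zero =>
    intro lines hlen buf segs hbuf
    have hnil : lines = [] := List.length_eq_zero_iff.mp (Nat.le_zero.mp hlen)
    subst hnil
    rw [pvALoop_nil, List.append_nil,
      pvBLoop_eq_base _ _ _ (pvSpanOpen_all buf hbuf)]
    by_cases hb : buf = []
    · subst hb
      rw [pvFlush, if_pos rfl]
      apply String.toList_inj.mp
      simp [pvToListJoin0, pvJoinFlatten, PySem.Chars.join_nil, String.toList_append,
        pvJoinNL_nil, pvRender_nil]
    · rw [pvFlush, if_neg hb, pvRender_append_text]
      apply String.toList_inj.mp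
      simp [pvToListJoin0, pvJoinFlatten, PySem.Chars.join_nil, String.toList_append]
  | succ n ih =>
    intro lines hlen buf segs hbuf
    cases lines with
    | nil =>
      rw [pvALoop_nil, List.append_nil,
        pvBLoop_eq_base _ _ _ (pvSpanOpen_all buf hbuf)]
      by_cases hb : buf = []
      · subst hb
        rw [pvFlush, if_pos rfl]
        apply String.toList_inj.mp
        simp [pvToListJoin0, pvJoinFlatten, PySem.Chars.join_nil, String.toList_append,
          pvJoinNL_nil, pvRender_nil]
      · rw [pvFlush, if_neg hb, pvRender_append_text]
        apply String.toList_inj.mp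
        simp [pvToListJoin0, pvJoinFlatten, PySem.Chars.join_nil, String.toList_append]
    | cons l rest =>
      simp only [List.length_cons, Nat.succ_le_succ_iff] at hlen
      by_cases hop : pvIsOpen l = true
      · -- fence line
        rw [pvALoop_cons_open _ _ _ _ hop]
        have hrest' : ((pvScanClose rest).2.tail).length ≤ n := by
          have h1 := pvScanClose_snd_length rest
          have h2 := pvTailLe (pvScanClose rest).2
          omega
        rw [ih _ hrest' [] _ (by simp)]
        rw [List.nil_append, pvRender_append_merm]
        rw [pvBLoop_eq_step _ _ _ _ _ (pvSpanOpen_append buf l rest hbuf hop)]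
        rw [pvDropBlock_eq_scan]
        rw [pvBLoop_out ((pvScanClose rest).2.tail.length) ((pvScanClose rest).2.tail)
          (le_refl _) ([] ++ [PySem.Str.join "\n" buf, pvPlaceholder])]
        by_cases hb : buf = []
        · subst hb
          rw [pvFlush, if_pos rfl]
          apply String.toList_inj.mp
          simp [pvToListJoin0, pvJoinFlatten, PySem.Chars.join_nil, String.toList_append,
            pvJoinNL_nil]
        · rw [pvFlush, if_neg hb, pvRender_append_text]
          apply String.toList_inj.mp
          simp [pvToListJoin0, pvJoinFlatten, PySem.Chars.join_nil, String.toList_append]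
      · -- ordinary line
        have hop' : pvIsOpen l = false := by simpa using hop
        rw [pvALoop_cons_notopen _ _ _ _ hop']
        rw [ih rest hlen (buf ++ [l]) segs
          (by
            intro x hx
            rcases List.mem_append.mp hx with hx | hx
            · exact hbuf x hx
            · simp at hx; subst hx; exact hop')]
        rw [List.append_assoc]
        rfl

-- A's segment loop never yields the empty list on nonempty input
theorem pvALoop_ne (n : Nat) :
    ∀ lines : List String, lines.length ≤ n →
    ∀ (buf : List String) (segs : List (String × String)),
      (lines ≠ [] ∨ buf ≠ [] ∨ segs ≠ []) → pvALoop lines buf segs ≠ [] := by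
  induction n with
  | zero =>
    intro lines hlen buf segs h
    have hnil : lines = [] := List.length_eq_zero_iff.mp (Nat.le_zero.mp hlen)
    subst hnil
    rw [pvALoop_nil, pvFlush]
    split
    · rename_i hb
      subst hb
      rcases h with h | h | h
      · exact absurd rfl h
      · exact absurd rfl h
      · exact h
    · simp
  | succ n ih =>
    intro lines hlen buf segs h
    cases lines with
    | nil =>
      rw [pvALoop_nil, pvFlush]
      split
      · rename_i hb
        subst hb
        rcases h with h | h | h
        · exact absurd rfl h
        · exact absurd rfl h
        · exact h
      · simp
    | cons l rest =>
      simp only [List.length_cons, Nat.succ_le_succ_iff] at hlen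
      by_cases hop : pvIsOpen l = true
      · rw [pvALoop_cons_open _ _ _ _ hop]
        apply ih _ (by
          have h1 := pvScanClose_snd_length rest
          have h2 := pvTailLe (pvScanClose rest).2
          omega)
        right; right
        simp
      · have hop' : pvIsOpen l = false := by simpa using hop
        rw [pvALoop_cons_notopen _ _ _ _ hop']
        apply ih _ hlen
        right; left
        simp
-- splitting on "\n" never yields the empty list
theorem pvGo_ne_nil (sep : List Char) (fuel : Nat) :
    ∀ (l cur : List Char) (acc : List (List Char)),
      PySem.Chars.splitOn.go sep fuel l cur acc ≠ [] := by
  induction fuel with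
  | zero => intro l cur acc; simp [PySem.Chars.splitOn.go]
  | succ n ih =>
    intro l cur acc
    cases l with
    | nil => simp [PySem.Chars.splitOn.go]
    | cons c rest =>
      rw [PySem.Chars.splitOn.go]
      split
      · exact ih _ _ _
      · exact ih _ _ _

theorem pvLines_ne (t : String) : (PySem.Str.split? t "\n").getD [] ≠ [] := by
  have hsep : ("\n" : String).toList = ['\n'] := rfl
  rw [PySem.Str.split?, PySem.Chars.split?, hsep, if_neg (by simp)]
  simp only [Option.map_some, Option.getD_some, ne_eq, List.map_eq_nil_iff]
  rw [PySem.Chars.splitOn]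
  exact pvGo_ne_nil _ _ _ _ _

-- ===== VERDICT (by name: the statement is the Claim_ definition above) =====
theorem markdown_intermediate_without_mermaid_images_spec : Claim_equal_markdown_intermediate_without_mermaid_images := by
  intro markdown _
  show markdown_intermediate_without_mermaid_images markdown
      = markdown_intermediate_without_mermaid_images_alt markdown
  rw [markdown_intermediate_without_mermaid_images,
    markdown_intermediate_without_mermaid_images_alt, pvSplitSegments]
  set text := PySem.Str.replace (if markdown == "" then "" else markdown) "\r\n" "\n" with htext
  set lines := (PySem.Str.split? text "\n").getD [] with hlines
  have hne : pvALoop lines [] [] ≠ [] :=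
    pvALoop_ne lines.length lines (le_refl _) [] []
      (Or.inl (pvLines_ne text))
  rw [if_neg hne]
  have hfold :
      (pvALoop lines [] []).foldl (fun acc kv =>
        acc ++ [if kv.1 == "text" then kv.2 else pvPlaceholder]) ([] : List String)
      = (pvALoop lines [] []).map (fun kv => if kv.1 == "text" then kv.2 else pvPlaceholder) := by
    simpa using PySem.List.foldl_append_singleton_eq_map
      (fun kv : String × String => if kv.1 == "text" then kv.2 else pvPlaceholder)
      (pvALoop lines [] []) []
  rw [hfold]
  have hmain := pvMain lines.length lines (le_refl _) [] [] (by simp)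
  rw [List.nil_append] at hmain
  have hrend : PySem.Str.join ""
      ((pvALoop lines [] []).map (fun kv => if kv.1 == "text" then kv.2 else pvPlaceholder))
      = pvRender (pvALoop lines [] []) := rfl
  rw [hrend, hmain, pvRender_nil]
  apply String.toList_inj.mp
  simp [String.toList_append]
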